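-- pv_equiv track=rewrite | github.com/wadelili/leetcode | others/findMiddleNum.py | findMiddleNums
-- ===== SOURCE A (Python) =====
-- def findMiddleNums(nums):
--     """
--     :type nums: list
--     :rtype: list
--     """
--     size = len(nums)
--     l_max_list = []
--     l_max = 0
--     for i in range(0, size):
--         l_max_list.append(l_max)
--         if nums[i] > l_max:
--             l_max = nums[i]
--
--     res = []
--     r_min = nums[size - 1]
--     for i in range(0, size)[::-1]:
--         if l_max_list[i] < nums[i] <= r_min:
--             res.insert(0, i)
--         if nums[i] < r_min:
--             r_min = nums[i]
--
--     return res
-- ===== SOURCE B (Python) =====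
-- def findMiddleNums(nums):
--     # Monotonic-stack single pass: keep a stack of candidate indices whose
--     # values are strictly increasing; a new element x evicts candidates whose
--     # value exceeds x (they are not <= everything to their right), and x is
--     # pushed as a new candidate iff it beats the running left max (floored at 0).
--     stack = []
--     l_max = 0
--     for i, x in enumerate(nums):
--         while stack and nums[stack[-1]] > x:
--             stack.pop()
--         if x > l_max:
--             stack.append(i)
--             l_max = x
--     return stack
-- ===== Notes on version B (the rewrite author's own statement) =====
-- stated objective: faster
-- what changed: Replaces A's two staged passes (prefix-max array, then a backward scan with a running right minimum and res.insert(0,...)) by a single forward monotonic-stack pass: candidates are pushed when they beat the running left max and evicted when a smaller element arrives, so no auxiliary array, no second pass and no front insertion.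
import Mathlib
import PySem

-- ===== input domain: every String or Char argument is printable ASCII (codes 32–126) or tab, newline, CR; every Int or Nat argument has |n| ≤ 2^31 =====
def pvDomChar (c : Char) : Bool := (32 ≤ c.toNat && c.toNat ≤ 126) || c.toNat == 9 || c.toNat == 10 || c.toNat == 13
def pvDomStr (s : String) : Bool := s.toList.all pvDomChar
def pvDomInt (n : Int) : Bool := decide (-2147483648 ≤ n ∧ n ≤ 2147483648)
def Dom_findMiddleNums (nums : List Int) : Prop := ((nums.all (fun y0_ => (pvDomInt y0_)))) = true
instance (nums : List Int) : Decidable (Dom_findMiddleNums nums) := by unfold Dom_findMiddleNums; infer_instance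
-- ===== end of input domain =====

-- B replaces A's two passes (prefix-max array, then a backward pass with a running right
-- minimum and res.insert(0, ...)) by a single forward monotonic-stack pass; same return
-- value on every nonempty input (A raises IndexError on []).

-- ===== PORT A =====
-- literal port of Source A; under Pre_ (nums ≠ []) every nums[i] access is in range, so
-- pyGetD's default is never used; nums[size-1] raises IndexError exactly when nums = [].
def findMiddleNums (nums : List Int) : List Int :=
  let size : Int := nums.length
  let s1 :=
    (PySem.List.pyRange 0 size 1).foldl
      (fun (st : List Int × Int) (i : Int) =>
        (st.1 ++ [st.2],
         if PySem.List.pyGetD nums i 0 > st.2 then PySem.List.pyGetD nums i 0 else st.2))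
      ([], 0)
  let l_max_list := s1.1
  let r_min := PySem.List.pyGetD nums (size - 1) 0
  -- range(0, size)[::-1] is the reversed range
  let s2 :=
    ((PySem.List.pyRange 0 size 1).reverse).foldl
      (fun (st : List Int × Int) (i : Int) =>
        (if PySem.List.pyGetD l_max_list i 0 < PySem.List.pyGetD nums i 0 ∧
            PySem.List.pyGetD nums i 0 ≤ st.2
         then PySem.List.insert st.1 0 i else st.1,
         if PySem.List.pyGetD nums i 0 < st.2 then PySem.List.pyGetD nums i 0 else st.2))
      ([], r_min)
  s2.1

-- ===== PORT B =====
-- literal port of Source B. The Python stack grows at the END (append/pop/stack[-1]); here the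
-- stack is kept TOP-FIRST (head = Python's stack[-1]) so the final result is stack.reverse.
-- pvPop is the 'while stack and nums[stack[-1]] > x: stack.pop()' loop, step for step.
def pvPop (nums : List Int) (x : Int) : List Int → List Int
  | [] => []
  | j :: rest => if PySem.List.pyGetD nums j 0 > x then pvPop nums x rest else j :: rest

def findMiddleNums_alt (nums : List Int) : List Int :=
  let s :=
    (PySem.List.enumerate nums 0).foldl
      (fun (st : List Int × Int) (p : Int × Int) =>
        let stack' := pvPop nums p.2 st.1
        if p.2 > st.2 then (p.1 :: stack', p.2) else (stack', st.2))
      ([], 0)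
  s.1.reverse

-- ===== PRECONDITION & SPEC =====
-- A raises IndexError on the empty list (nums[size-1]); Pre_ excludes exactly that input.
def Pre_findMiddleNums (nums : List Int) : Prop := nums ≠ []
instance (nums : List Int) : Decidable (Pre_findMiddleNums nums) := by
  unfold Pre_findMiddleNums; infer_instance
def pvWitness_findMiddleNums : List Int := ([1, 3, 2, 5, 4] : List Int)

def Spec_findMiddleNums (nums : List Int) (out : List Int) : Prop := out = findMiddleNums_alt nums
instance (nums : List Int) (out : List Int) : Decidable (Spec_findMiddleNums nums out) := by
  unfold Spec_findMiddleNums; infer_instance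

-- ===== CLAIM (what is proved, stated in full; the proofs are below) =====
def Claim_equal_findMiddleNums : Prop :=
  ∀ (nums : List Int), Dom_findMiddleNums nums → Pre_findMiddleNums nums →
    Spec_findMiddleNums nums (findMiddleNums nums)

-- ===== LEMMAS AND PROOFS =====

-- prefix max with floor 0: max(0, nums[0..k-1])
def pvPmax (nums : List Int) (k : Nat) : Int := (nums.take k).foldl max 0

-- minimum of a list seeded by its head (0 for [] — never used on [])
def pvTMin : List Int → Int
  | [] => 0
  | x :: xs => xs.foldl min x

-- the shared characterisation of the result
def pvF (nums : List Int) (k : Nat) : Option Int :=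
  if pvPmax nums k < nums.getD k 0 ∧ nums.getD k 0 ≤ pvTMin (nums.drop k)
  then some ((k : Int)) else none

def pvTarget (nums : List Int) : List Int :=
  (List.range nums.length).filterMap (pvF nums)

-- running right minimum of A's second loop, seeded with nums[-1]
def pvR (nums : List Int) (k : Nat) : Int :=
  (nums.drop k).foldl min (nums.getD (nums.length - 1) 0)

theorem pvFoldlMin_comm (l : List Int) : ∀ (a x : Int),
    l.foldl min (min a x) = min x (l.foldl min a) := by
  induction l with
  | nil => intro a x; simp [min_comm]
  | cons y t ih =>
    intro a x
    simp only [List.foldl_cons]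
    have : min (min a x) y = min (min a y) x := by
      rw [min_assoc, min_assoc, min_comm x y]
    rw [this, ih]

theorem pvFoldlMin_eq (l : List Int) (h : l ≠ []) : ∀ (a : Int),
    l.foldl min a = min a (pvTMin l) := by
  induction l with
  | nil => exact absurd rfl h
  | cons x t ih =>
    intro a
    cases t with
    | nil => simp [pvTMin]
    | cons y u =>
      rw [List.foldl_cons, ih (by simp) (min a x),
        show pvTMin (x :: y :: u) = List.foldl min x (y :: u) from rfl,
        ih (by simp) x, min_assoc]

theorem pvTMin_le_of_mem {x : Int} {l : List Int} (h : x ∈ l) : pvTMin l ≤ x := by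
  induction l with
  | nil => simp at h
  | cons y t ih =>
    cases t with
    | nil => simp at h; simp [pvTMin, h]
    | cons z u =>
      have hne : (z :: u) ≠ ([] : List Int) := by simp
      have : pvTMin (y :: z :: u) = min y (pvTMin (z :: u)) := by
        simpa [pvTMin] using pvFoldlMin_eq (z :: u) hne y
      rcases List.mem_cons.mp h with rfl | hm
      · rw [this]; exact min_le_left _ _
      · rw [this]; exact le_trans (min_le_right _ _) (ih hm)

theorem pvTMin_mem (l : List Int) (h : l ≠ []) : pvTMin l ∈ l := by
  induction l with
  | nil => exact absurd rfl h
  | cons x t ih =>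
    cases t with
    | nil => simp [pvTMin]
    | cons z u =>
      have hne : (z :: u) ≠ ([] : List Int) := by simp
      have hmin : pvTMin (x :: z :: u) = min x (pvTMin (z :: u)) := by
        simpa [pvTMin] using pvFoldlMin_eq (z :: u) hne x
      rcases le_total x (pvTMin (z :: u)) with hle | hle
      · rw [hmin, min_eq_left hle]; exact List.mem_cons_self
      · rw [hmin, min_eq_right hle]
        exact List.mem_cons_of_mem _ (ih hne)

theorem pvLe_pvTMin_iff {a : Int} {l : List Int} (h : l ≠ []) :
    a ≤ pvTMin l ↔ ∀ y ∈ l, a ≤ y := by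
  constructor
  · intro hle y hy; exact le_trans hle (pvTMin_le_of_mem hy)
  · intro hall; exact hall _ (pvTMin_mem l h)

theorem pvFoldlMin_mem (l : List Int) (a : Int) (h : a ∈ l) : l.foldl min a = pvTMin l := by
  have hne : l ≠ [] := by rintro rfl; simp at h
  rw [pvFoldlMin_eq l hne a, min_eq_right (pvTMin_le_of_mem h)]

theorem pvPmax_succ (nums : List Int) (k : Nat) (h : k < nums.length) :
    pvPmax nums (k + 1) = max (pvPmax nums k) (nums.getD k 0) := by
  unfold pvPmax
  rw [List.take_add_one, List.getElem?_eq_getElem h, List.foldl_append]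
  simp only [Option.toList_some, List.foldl_cons, List.foldl_nil]
  rw [List.getD_eq_getElem?_getD, List.getElem?_eq_getElem h]
  rfl

theorem pvIfMax (a b : Int) : (if b > a then b else a) = max a b := by
  rw [max_def]; split_ifs <;> omega

theorem pvIfMin (x r : Int) : (if x < r then x else r) = min x r := by
  rw [min_def]; split_ifs <;> omega

theorem pvR_succ (nums : List Int) (k : Nat) (h : k < nums.length) :
    pvR nums k = min (nums.getD k 0) (pvR nums (k + 1)) := by
  have hget : nums.getD k 0 = nums[k] := by
    rw [List.getD_eq_getElem?_getD, List.getElem?_eq_getElem h]; rfl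
  unfold pvR
  rw [List.drop_eq_getElem_cons h, List.foldl_cons, hget]
  exact pvFoldlMin_comm _ _ _

theorem pvLastMemDrop (nums : List Int) (k : Nat) (h : k + 1 < nums.length) :
    nums.getD (nums.length - 1) 0 ∈ nums.drop (k + 1) := by
  have h1 : nums.length - 1 < nums.length := by omega
  rw [List.getD_eq_getElem?_getD, List.getElem?_eq_getElem h1]
  simp only [Option.getD_some]
  have h2 : nums.length - 1 - (k + 1) < (nums.drop (k + 1)).length := by
    simp [List.length_drop]; omega
  have : nums[nums.length - 1] = (nums.drop (k + 1))[nums.length - 1 - (k + 1)] := by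
    rw [List.getElem_drop]
    congr 1; omega
  rw [this]
  exact List.getElem_mem _

-- A's comparison against the running right min agrees with the suffix minimum
theorem pvCondA (nums : List Int) (k : Nat) (h : k < nums.length) :
    (nums.getD k 0 ≤ pvR nums (k + 1)) ↔ (nums.getD k 0 ≤ pvTMin (nums.drop k)) := by
  have hdrop : nums.drop k = nums[k] :: nums.drop (k + 1) := List.drop_eq_getElem_cons h
  have hget : nums.getD k 0 = nums[k] := by
    rw [List.getD_eq_getElem?_getD, List.getElem?_eq_getElem h]; rfl
  by_cases hk : k + 1 < nums.length
  · have hne : nums.drop (k + 1) ≠ [] := by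
      intro hnil
      have := List.length_drop (l := nums) (i := k + 1)
      rw [hnil] at this; simp at this; omega
    have hR : pvR nums (k + 1) = pvTMin (nums.drop (k + 1)) :=
      pvFoldlMin_mem _ _ (pvLastMemDrop nums k hk)
    have hT : pvTMin (nums.drop k) = min (nums[k]) (pvTMin (nums.drop (k + 1))) := by
      rw [hdrop]
      show List.foldl min (nums[k]) (nums.drop (k + 1)) = _
      rw [pvFoldlMin_eq _ hne]
    rw [hR, hT, hget, le_min_iff]
    constructor
    · exact fun h2 => ⟨le_refl _, h2⟩
    · exact fun h2 => h2.2
  · have hlen : nums.length = k + 1 := by omega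
    have hdnil : nums.drop (k + 1) = [] := by
      apply List.drop_eq_nil_of_le; omega
    have hR : pvR nums (k + 1) = nums.getD k 0 := by
      unfold pvR; rw [hdnil]
      simp only [List.foldl_nil]
      congr 1; omega
    have hT : pvTMin (nums.drop k) = nums[k] := by
      rw [hdrop, hdnil]; simp [pvTMin]
    rw [hR, hT, hget]

-- ===== A side =====

theorem pvLoopA1 (nums : List Int) : ∀ (k : Nat), k ≤ nums.length →
    (List.range k).foldl
      (fun (st : List Int × Int) (j : Nat) =>
        (st.1 ++ [st.2], if nums.getD j 0 > st.2 then nums.getD j 0 else st.2))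
      ([], 0)
    = ((List.range k).map (fun j => pvPmax nums j), pvPmax nums k) := by
  intro k
  induction k with
  | zero => intro _; simp [pvPmax]
  | succ k ih =>
    intro hk
    have hklt : k < nums.length := by omega
    rw [List.range_succ, List.foldl_append, ih (by omega)]
    simp only [List.foldl_cons, List.foldl_nil, List.map_append, List.map_cons, List.map_nil]
    rw [pvIfMax, ← pvPmax_succ nums k hklt]

theorem pvLoopA2 (nums : List Int) (lml : List Int)
    (hlml : lml = (List.range nums.length).map (fun j => pvPmax nums j)) :
    ∀ (k : Nat), k ≤ nums.length → ∀ (res : List Int),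
    ((List.map (fun (j : Nat) => (j : Int)) (List.range k)).reverse).foldl
      (fun (st : List Int × Int) (i : Int) =>
        (if PySem.List.pyGetD lml i 0 < PySem.List.pyGetD nums i 0 ∧
            PySem.List.pyGetD nums i 0 ≤ st.2
         then PySem.List.insert st.1 0 i else st.1,
         if PySem.List.pyGetD nums i 0 < st.2 then PySem.List.pyGetD nums i 0 else st.2))
      (res, pvR nums k)
    = ((List.range k).filterMap (pvF nums) ++ res, pvR nums 0) := by
  intro k
  induction k with
  | zero => intro _ res; simp
  | succ k ih =>
    intro hk res
    have hklt : k < nums.length := by omega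
    rw [List.range_succ, List.map_append, List.reverse_append]
    simp only [List.map_cons, List.map_nil, List.reverse_cons, List.reverse_nil,
      List.nil_append, List.singleton_append, List.foldl_cons]
    have hlget : PySem.List.pyGetD lml (k : Int) 0 = pvPmax nums k := by
      rw [PySem.List.pyGetD_natCast, hlml, PySem.List.getD_map_range _ _ _ _ hklt]
    rw [hlget, PySem.List.pyGetD_natCast nums k 0, pvIfMin, ← pvR_succ nums k hklt]
    by_cases hc : pvPmax nums k < nums.getD k 0 ∧ nums.getD k 0 ≤ pvTMin (nums.drop k)
    · have hc' : pvPmax nums k < nums.getD k 0 ∧ nums.getD k 0 ≤ pvR nums (k + 1) :=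
        ⟨hc.1, (pvCondA nums k hklt).mpr hc.2⟩
      rw [if_pos hc', PySem.List.insert_zero, ih (by omega)]
      rw [List.filterMap_append]
      have hF : pvF nums k = some ((k : Int)) := by unfold pvF; rw [if_pos hc]
      simp [hF]
    · have hc' : ¬ (pvPmax nums k < nums.getD k 0 ∧ nums.getD k 0 ≤ pvR nums (k + 1)) := by
        intro h2; exact hc ⟨h2.1, (pvCondA nums k hklt).mp h2.2⟩
      rw [if_neg hc', ih (by omega)]
      rw [List.filterMap_append]
      have hF : pvF nums k = none := by unfold pvF; rw [if_neg hc]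
      simp [hF]

theorem pvA_eq (nums : List Int) (h : nums ≠ []) : findMiddleNums nums = pvTarget nums := by
  unfold findMiddleNums
  simp only [PySem.List.pyRange_zero_nat, List.foldl_map, PySem.List.pyGetD_natCast]
  rw [pvLoopA1 nums nums.length (le_refl _)]
  have hlen : 0 < nums.length := List.length_pos_iff.mpr h
  have hinit : PySem.List.pyGetD nums ((nums.length : Int) - 1) 0 = pvR nums nums.length := by
    have : ((nums.length : Int) - 1) = ((nums.length - 1 : Nat) : Int) := by
      push_cast [Nat.cast_sub (by omega : 1 ≤ nums.length)]; ring
    rw [this, PySem.List.pyGetD_natCast]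
    unfold pvR
    simp [List.drop_eq_nil_of_le (le_refl nums.length)]
  simp only [hinit]
  rw [pvLoopA2 nums _ rfl nums.length (le_refl _) []]
  simp [pvTarget]

-- ===== B side =====

-- candidate condition after the first k elements have been processed: i was pushed
-- (strict prefix max, above the 0 floor) and not yet popped (≤ everything in nums[i+1..k-1])
def pvOK (nums : List Int) (k i : Nat) : Bool :=
  decide (pvPmax nums i < nums.getD i 0) &&
  ((nums.take k).drop (i + 1)).all (fun y => decide (nums.getD i 0 ≤ y))

def pvCand (nums : List Int) (k : Nat) : List Nat := (List.range k).filter (pvOK nums k)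

theorem pvLeFoldlMax (l : List Int) : ∀ (a : Int), a ≤ l.foldl max a := by
  induction l with
  | nil => intro a; simp
  | cons x t ih =>
    intro a
    exact le_trans (le_max_left a x) (by simpa using ih (max a x))

theorem pvPmax_mono (nums : List Int) {k k' : Nat} (h : k ≤ k') :
    pvPmax nums k ≤ pvPmax nums k' := by
  unfold pvPmax
  conv_rhs => rw [← List.take_append_drop k (nums.take k')]
  rw [List.take_take, min_eq_left h, List.foldl_append]
  exact pvLeFoldlMax _ _

theorem pvGetD_le_pvPmax (nums : List Int) {a b : Nat} (hab : a < b) (ha : a < nums.length) :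
    nums.getD a 0 ≤ pvPmax nums b := by
  have h1 : nums.getD a 0 ≤ pvPmax nums (a + 1) := by
    rw [pvPmax_succ nums a ha]; exact le_max_right _ _
  exact le_trans h1 (pvPmax_mono nums (by omega))

-- the while-pop loop on a value-nonincreasing (top-first) stack is a filter
theorem pvPop_filter (nums : List Int) (x : Int) : ∀ (s : List Nat),
    List.Pairwise (fun a b : Nat => nums.getD b 0 ≤ nums.getD a 0) s →
    pvPop nums x (s.map (fun (n : Nat) => (n : Int)))
      = (s.filter (fun j => decide (nums.getD j 0 ≤ x))).map (fun (n : Nat) => (n : Int)) := by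
  intro s
  induction s with
  | nil => intro _; rfl
  | cons j t ih =>
    intro hp
    simp only [List.map_cons, pvPop, PySem.List.pyGetD_natCast]
    by_cases hj : nums.getD j 0 > x
    · rw [if_pos hj, ih hp.of_cons, List.filter_cons,
        if_neg (by simp only [decide_eq_true_eq]; omega)]
    · rw [if_neg hj, List.filter_cons, if_pos (by simp only [decide_eq_true_eq]; omega)]
      have ht : t.filter (fun j => decide (nums.getD j 0 ≤ x)) = t := by
        apply List.filter_eq_self.mpr
        intro b hb
        simp only [decide_eq_true_eq]
        have hb' : nums.getD b 0 ≤ nums.getD j 0 := (List.pairwise_cons.mp hp).1 b hb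
        omega
      rw [List.map_cons, ht]

-- candidate values increase with the index
theorem pvCand_pairwise (nums : List Int) (k : Nat) (hk : k ≤ nums.length) :
    List.Pairwise (fun a b : Nat => nums.getD a 0 ≤ nums.getD b 0) (pvCand nums k) := by
  apply List.Pairwise.imp_of_mem _ ((List.pairwise_lt_range).filter (pvOK nums k))
  intro a b ha hb hab
  have hb' : pvOK nums k b = true := List.of_mem_filter hb
  have ha' : a < k := List.mem_range.mp (List.mem_of_mem_filter ha)
  have h1 : pvPmax nums b < nums.getD b 0 := by
    have := (Bool.and_eq_true _ _).mp hb' |>.1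
    simpa using this
  have h2 : nums.getD a 0 ≤ pvPmax nums b := pvGetD_le_pvPmax nums hab (by omega)
  omega

theorem pvOK_lt (nums : List Int) (k i : Nat) (hik : i < k) (hk : k < nums.length) :
    pvOK nums (k + 1) i
      = (pvOK nums k i && decide (nums.getD i 0 ≤ nums.getD k 0)) := by
  unfold pvOK
  have hkl : (nums.take k).length = k := List.length_take_of_le (by omega)
  have hget : nums[k]? = some nums[k] := List.getElem?_eq_getElem hk
  rw [List.take_add_one, hget]
  simp only [Option.toList_some]
  rw [List.drop_append_of_le_length (by omega), List.all_append]
  have hgd : nums.getD k 0 = nums[k] := by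
    rw [List.getD_eq_getElem?_getD, hget]; rfl
  rw [hgd]
  simp [Bool.and_assoc]

theorem pvOK_self (nums : List Int) (k : Nat) :
    pvOK nums (k + 1) k = decide (pvPmax nums k < nums.getD k 0) := by
  unfold pvOK
  have : ((nums.take (k + 1)).drop (k + 1)) = [] :=
    List.drop_eq_nil_of_le (List.length_take_le (k + 1) nums)
  rw [this]
  simp

theorem pvCand_step (nums : List Int) (k : Nat) (hk : k < nums.length) :
    pvCand nums (k + 1)
      = ((pvCand nums k).filter (fun i => decide (nums.getD i 0 ≤ nums.getD k 0)))
        ++ (if pvPmax nums k < nums.getD k 0 then [k] else []) := by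
  unfold pvCand
  rw [List.range_succ, List.filter_append, List.filter_filter]
  congr 1
  · apply List.filter_congr
    intro i hi
    rw [pvOK_lt nums k i (List.mem_range.mp hi) hk, Bool.and_comm]
  · rw [List.filter_cons, pvOK_self nums k]
    by_cases h : pvPmax nums k < nums.getD k 0
    · rw [if_pos (by exact decide_eq_true h), if_pos h]
      rfl
    · rw [if_neg (by simp only [decide_eq_true_eq]; exact h), if_neg h]
      rfl

-- B's loop invariant: after processing nums[0..k-1] the state is
-- (the candidates so far, top-first, and the running left max)
theorem pvLoopB (nums : List Int) : ∀ (m k : Nat), k + m = nums.length →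
    (PySem.List.enumerate (nums.drop k) (k : Int)).foldl
      (fun (st : List Int × Int) (p : Int × Int) =>
        let stack' := pvPop nums p.2 st.1
        if p.2 > st.2 then (p.1 :: stack', p.2) else (stack', st.2))
      ((pvCand nums k).reverse.map (fun (n : Nat) => (n : Int)), pvPmax nums k)
    = ((pvCand nums nums.length).reverse.map (fun (n : Nat) => (n : Int)), pvPmax nums nums.length) := by
  intro m
  induction m with
  | zero =>
    intro k hk
    have hkk : k = nums.length := by omega
    subst hkk
    rw [List.drop_eq_nil_of_le (le_refl _), PySem.List.enumerate_nil, List.foldl_nil]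
  | succ m ih =>
    intro k hk
    have hklt : k < nums.length := by omega
    have hget : nums.getD k 0 = nums[k] := by
      rw [List.getD_eq_getElem?_getD, List.getElem?_eq_getElem hklt]; rfl
    rw [List.drop_eq_getElem_cons hklt, PySem.List.enumerate_cons, List.foldl_cons, ← hget]
    have hpair : List.Pairwise (fun a b : Nat => nums.getD b 0 ≤ nums.getD a 0)
        (pvCand nums k).reverse :=
      List.pairwise_reverse.mpr (pvCand_pairwise nums k (by omega))
    have hpop : pvPop nums (nums.getD k 0) ((pvCand nums k).reverse.map (fun (n : Nat) => (n : Int)))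
        = ((pvCand nums k).filter
            (fun j => decide (nums.getD j 0 ≤ nums.getD k 0))).reverse.map
              (fun (n : Nat) => (n : Int)) := by
      rw [pvPop_filter nums (nums.getD k 0) _ hpair, List.filter_reverse]
    have hcast : ((k : Int) + 1) = (((k + 1 : Nat)) : Int) := by push_cast; ring
    simp only [hpop]
    by_cases hc : pvPmax nums k < nums.getD k 0
    · rw [if_pos (by omega)]
      have hstack : ((k : Int) :: ((pvCand nums k).filter
            (fun j => decide (nums.getD j 0 ≤ nums.getD k 0))).reverse.map
              (fun (n : Nat) => (n : Int)))
          = (pvCand nums (k + 1)).reverse.map (fun (n : Nat) => (n : Int)) := by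
        rw [pvCand_step nums k hklt, if_pos hc, List.reverse_append]
        simp
      have hmax : nums.getD k 0 = pvPmax nums (k + 1) := by
        rw [pvPmax_succ nums k hklt, max_eq_right (by omega)]
      rw [hstack, hmax, hcast, ih (k + 1) (by omega)]
    · rw [if_neg (by omega)]
      have hstack : ((pvCand nums k).filter
            (fun j => decide (nums.getD j 0 ≤ nums.getD k 0))).reverse.map
              (fun (n : Nat) => (n : Int))
          = (pvCand nums (k + 1)).reverse.map (fun (n : Nat) => (n : Int)) := by
        rw [pvCand_step nums k hklt, if_neg hc]
        simp
      have hmax : pvPmax nums k = pvPmax nums (k + 1) := by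
        rw [pvPmax_succ nums k hklt, max_eq_left (by omega)]
      rw [hstack, hmax, hcast, ih (k + 1) (by omega)]

-- final candidates are exactly the target condition
theorem pvOK_final (nums : List Int) (i : Nat) (hi : i < nums.length) :
    pvOK nums nums.length i
      = decide (pvPmax nums i < nums.getD i 0 ∧ nums.getD i 0 ≤ pvTMin (nums.drop i)) := by
  unfold pvOK
  rw [List.take_length]
  have hdrop : nums.drop i = nums[i] :: nums.drop (i + 1) := List.drop_eq_getElem_cons hi
  have hget : nums.getD i 0 = nums[i] := by
    rw [List.getD_eq_getElem?_getD, List.getElem?_eq_getElem hi]; rfl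
  have hiff : ((nums.drop (i + 1)).all (fun y => decide (nums.getD i 0 ≤ y)) = true)
      ↔ (nums.getD i 0 ≤ pvTMin (nums.drop i)) := by
    rw [List.all_eq_true]
    cases hdn : nums.drop (i + 1) with
    | nil =>
      have hT : pvTMin (nums.drop i) = nums[i] := by rw [hdrop, hdn]; simp [pvTMin]
      rw [hT, hget]
      simp
    | cons z u =>
      rw [← hdn]
      have hne : nums.drop (i + 1) ≠ [] := by rw [hdn]; simp
      have hT : pvTMin (nums.drop i) = min (nums[i]) (pvTMin (nums.drop (i + 1))) := by
        rw [hdrop]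
        show List.foldl min (nums[i]) (nums.drop (i + 1)) = _
        rw [pvFoldlMin_eq _ hne]
      rw [hT, hget, le_min_iff]
      constructor
      · intro hall
        refine ⟨le_refl _, (pvLe_pvTMin_iff hne).mpr (fun y hy => ?_)⟩
        simpa using hall y hy
      · intro h2 y hy
        simp only [decide_eq_true_eq]
        exact le_trans h2.2 (pvTMin_le_of_mem hy)
  by_cases hp2 : ((nums.drop (i + 1)).all (fun y => decide (nums.getD i 0 ≤ y))) = true
  · rw [hp2, Bool.and_true]
    simp only [decide_eq_decide]
    exact ⟨fun h1 => ⟨h1, hiff.mp hp2⟩, fun h1 => h1.1⟩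
  · simp only [Bool.not_eq_true] at hp2
    rw [hp2, Bool.and_false]
    have h2 : ¬ (nums.getD i 0 ≤ pvTMin (nums.drop i)) := by
      intro hx
      rw [hiff.mpr hx] at hp2
      simp at hp2
    simp only [Bool.false_eq, decide_eq_false_iff_not]
    intro hand
    exact h2 hand.2

theorem pvFilterMap_eq (nums : List Int) : ∀ (l : List Nat), (∀ i ∈ l, i < nums.length) →
    l.filterMap (pvF nums)
      = (l.filter (pvOK nums nums.length)).map (fun (n : Nat) => (n : Int)) := by
  intro l
  induction l with
  | nil => intro _; simp
  | cons i t ih =>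
    intro hl
    have hi : i < nums.length := hl i List.mem_cons_self
    rw [List.filterMap_cons, List.filter_cons]
    by_cases hc : pvPmax nums i < nums.getD i 0 ∧ nums.getD i 0 ≤ pvTMin (nums.drop i)
    · rw [show pvF nums i = some ((i : Int)) from by unfold pvF; rw [if_pos hc],
        if_pos (by rw [pvOK_final nums i hi]; simpa using hc)]
      rw [List.map_cons, ih (fun j hj => hl j (List.mem_cons_of_mem _ hj))]
    · rw [show pvF nums i = none from by unfold pvF; rw [if_neg hc],
        if_neg (by rw [pvOK_final nums i hi]; simpa using hc)]
      exact ih (fun j hj => hl j (List.mem_cons_of_mem _ hj))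

theorem pvB_eq (nums : List Int) : findMiddleNums_alt nums = pvTarget nums := by
  unfold findMiddleNums_alt
  have h0 : PySem.List.enumerate nums (0 : Int)
      = PySem.List.enumerate (nums.drop 0) ((0 : Nat) : Int) := by simp
  have hc0 : (pvCand nums 0).reverse.map (fun (n : Nat) => (n : Int)) = ([] : List Int) := by
    simp [pvCand]
  have hp0 : pvPmax nums 0 = 0 := by simp [pvPmax]
  rw [h0, show (([] : List Int), (0 : Int))
        = ((pvCand nums 0).reverse.map (fun (n : Nat) => (n : Int)), pvPmax nums 0) from by
      rw [hc0, hp0],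
    pvLoopB nums nums.length 0 (by omega)]
  simp only [List.map_reverse, List.reverse_reverse]
  rw [pvTarget, pvFilterMap_eq nums (List.range nums.length) (fun i hi => List.mem_range.mp hi)]
  rfl

-- ===== VERDICT (by name: the statement is the Claim_ definition above) =====
theorem findMiddleNums_spec : Claim_equal_findMiddleNums := by
  intro nums _ hpre
  unfold Spec_findMiddleNums
  rw [pvA_eq nums hpre, pvB_eq nums]
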